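-- pv_equiv track=rewrite | github.com/jaumefe/Advent_of_Code | 2022/Day_13/day13.py | listToTest
-- ===== SOURCE A (Python) =====
-- def listToTest (message, index):
--     mess = []
--     for i in range(index + 1, len(message)):
--         if message[i] == '[':
--             return listToTest(message, i)
--         elif message[i] != ']':
--             mess.append(int(message[i]))
--         elif len(mess) == 0:
--             return [0]
--         else:
--             return mess
-- ===== SOURCE B (Python) =====
-- def listToTest(message, index):
--     rest = message[index + 1:]
--     if ']' not in rest:
--         return None
--     seg = rest[:rest.index(']')]
--     if '[' in seg:
--         # an opening bracket abandons everything before it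
--         seg = seg[len(seg) - seg[::-1].index('['):]
--     vals = [int(c) for c in seg]
--     return vals if vals else [0]
-- ===== Notes on version B (the rewrite author's own statement) =====
-- stated objective: alternative
-- what changed: Replaces the restart-on-bracket tail recursion with an accumulator by a direct slice computation: take the tail after the start position, cut at the first ']', keep only what follows the last '[', and parse that slice in one comprehension.
-- intended difference: For a negative start (index+1 in [-len,-1]) where ']' occurs in message but not in message[index+1:], A's negative indexing silently wraps and rescans the whole list, returning a list scraped from that second pass; B returns None since no closing bracket follows the start, the intended behaviour. — e.g. on listToTest(["]", "1"], -2): A returns some [1], B returns none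
import Mathlib
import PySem

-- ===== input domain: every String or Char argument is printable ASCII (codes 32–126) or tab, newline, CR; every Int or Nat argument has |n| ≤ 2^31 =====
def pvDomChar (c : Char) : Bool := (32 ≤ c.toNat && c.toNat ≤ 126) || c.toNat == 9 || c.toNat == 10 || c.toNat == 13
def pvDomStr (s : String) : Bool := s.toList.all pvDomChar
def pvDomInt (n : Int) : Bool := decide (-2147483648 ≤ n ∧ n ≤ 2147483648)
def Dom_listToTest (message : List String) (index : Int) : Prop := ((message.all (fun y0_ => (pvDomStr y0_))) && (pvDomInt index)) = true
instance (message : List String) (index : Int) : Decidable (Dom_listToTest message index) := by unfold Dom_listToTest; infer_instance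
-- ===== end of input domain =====

-- B replaces A's restart-on-bracket tail recursion by a direct slice computation
-- (tail after the start, cut at the first ']', keep what follows the last '[',
-- parse once); same cost; B differs from A on the stated negative-start corner.

-- ===== PORT A =====
-- the for-loop of A with its accumulator `mess`; a '[' at position i is
-- `return listToTest(message, i)`, i.e. restart from i+1 with an empty `mess`.
-- fuel = number of remaining loop iterations (len - i), only to make the
-- recursion structural; listToTest supplies exactly that, so no branch changes
def pvALoop (message : List String) : Nat → Int → List Int → Option (List Int)
  | fuel, i, mess =>
    if i < (message.length : Int) then
      match fuel with
      | 0 => none           -- unreachable: fuel is exactly the remaining length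
      | fuel' + 1 =>
        match PySem.List.pyGet? message i with
        | none => none      -- IndexError (excluded by Pre_)
        | some c =>
          if c = "[" then pvALoop message fuel' (i + 1) []   -- return listToTest(message, i)
          else if c ≠ "]" then
            match PySem.Int.ofStr? c with
            | none => none  -- ValueError from int() (excluded by Pre_)
            | some v => pvALoop message fuel' (i + 1) (mess ++ [v])
          else if mess = [] then some [0] else some mess
    else none               -- loop fell through: Python returns None

def listToTest (message : List String) (index : Int) : Option (List Int) :=
  pvALoop message ((message.length : Int) - (index + 1)).toNat (index + 1) []

-- ===== PORT B =====
-- [int(c) for c in seg]: parse each element, None marks a ValueError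
def pvParseAll : List String → Option (List Int)
  | [] => some []
  | c :: rest =>
    match PySem.Int.ofStr? c with
    | none => none          -- ValueError (excluded by Pre_)
    | some v => (pvParseAll rest).map (v :: ·)

def listToTest_alt (message : List String) (index : Int) : Option (List Int) :=
  let rest := PySem.List.slice message (some (index + 1)) none
  match PySem.List.index? rest "]" with
  | none => none                                    -- "']' not in rest": return None
  | some j =>
    let seg := PySem.List.slice rest none (some (j : Int))
    let seg2 :=
      match PySem.List.index? seg.reverse "[" with  -- seg[::-1].index('[') (none ↔ '[' not in seg)
      | none => seg
      | some k => PySem.List.slice seg (some ((seg.length : Int) - (k : Int))) none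
    match pvParseAll seg2 with
    | none => none
    | some vals => if vals = [] then some [0] else some vals

-- ===== PRECONDITION & SPEC =====
-- the element sequence A scans: message[index+1], message[index+2], … up to the
-- end, with Python's negative-index semantics ("" only where Python would raise IndexError)
def pvScanned (message : List String) (i : Int) : List String :=
  (PySem.List.pyRange i (message.length : Int) 1).map
    (fun t => (PySem.List.pyGet? message t).getD "")

-- Pre_ excludes exactly the inputs where A raises: an IndexError (first scanned
-- position below -len) or a ValueError (a scanned element before the first ']'
-- that is neither '[' nor an int literal).
def Pre_listToTest (message : List String) (index : Int) : Prop :=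
  (index + 1 < (message.length : Int) → -(message.length : Int) ≤ index + 1) ∧
  ∀ s ∈ (pvScanned message (index + 1)).takeWhile (fun s => s ≠ "]"),
    s = "[" ∨ (PySem.Int.ofStr? s).isSome

instance (message : List String) (index : Int) : Decidable (Pre_listToTest message index) := by
  unfold Pre_listToTest; infer_instance

def pvWitness_listToTest : List String × Int := (["[", "1", "23", "]"], 0)

-- For a negative start (index+1 in [-len,-1]) where ']' occurs in message but not in
-- message[index+1:], A's negative indexing silently wraps and rescans the whole list,
-- returning a list scraped from that second pass; B returns None since no closing
-- bracket follows the start, the intended behaviour.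
def D_listToTest (message : List String) (index : Int) : Prop :=
  index + 1 < 0 ∧ -(message.length : Int) ≤ index + 1 ∧
  ("]" : String) ∉ PySem.List.slice message (some (index + 1)) none ∧
  ("]" : String) ∈ message

instance (message : List String) (index : Int) : Decidable (D_listToTest message index) := by
  unfold D_listToTest; infer_instance

def Spec_listToTest (message : List String) (index : Int) (out : Option (List Int)) : Prop := ¬ D_listToTest message index → out = listToTest_alt message index
instance (message : List String) (index : Int) (out : Option (List Int)) : Decidable (Spec_listToTest message index out) := by unfold Spec_listToTest; infer_instance

def pvDiffWitness_listToTest : List String × Int := (["]", "1"], -2)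
def pvDiffWitnessOut_listToTest : (Option (List Int)) × (Option (List Int)) := (some [1], none)

-- ===== CLAIM (what is proved, stated in full; the proofs are below) =====
def Claim_unchanged_listToTest : Prop := ∀ (message : List String) (index : Int), Dom_listToTest message index → Pre_listToTest message index → Spec_listToTest message index (listToTest message index)
def Claim_changed_listToTest : Prop := Dom_listToTest (pvDiffWitness_listToTest.1) (pvDiffWitness_listToTest.2) ∧ Pre_listToTest (pvDiffWitness_listToTest.1) (pvDiffWitness_listToTest.2) ∧ D_listToTest (pvDiffWitness_listToTest.1) (pvDiffWitness_listToTest.2) ∧ listToTest (pvDiffWitness_listToTest.1) (pvDiffWitness_listToTest.2) = pvDiffWitnessOut_listToTest.1 ∧ listToTest_alt (pvDiffWitness_listToTest.1) (pvDiffWitness_listToTest.2) = pvDiffWitnessOut_listToTest.2 ∧ pvDiffWitnessOut_listToTest.1 ≠ pvDiffWitnessOut_listToTest.2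
def Claim_exact_listToTest : Prop := ∀ (message : List String) (index : Int), Dom_listToTest message index → Pre_listToTest message index → D_listToTest message index → listToTest message index ≠ listToTest_alt message index

-- ===== LEMMAS AND PROOFS =====

-- recursive form of the scanned element sequence, for the loop inductions
def pvScan (message : List String) (i : Int) : List String :=
  if _h : i < (message.length : Int) then
    (PySem.List.pyGet? message i).getD "" :: pvScan message (i + 1)
  else []
termination_by ((message.length : Int) - i).toNat
decreasing_by all_goals omega

lemma pvScan_eq_scanned (message : List String) (k : Nat) :
    ∀ i : Int, ((message.length : Int) - i).toNat = k →
      pvScan message i = pvScanned message i := by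
  induction k with
  | zero =>
    intro i hk
    have h : ¬ i < (message.length : Int) := by omega
    rw [pvScan, pvScanned, PySem.List.pyRange_one_eq_nil (by omega)]
    simp [h]
  | succ k ih =>
    intro i hk
    have h : i < (message.length : Int) := by omega
    rw [pvScan, pvScanned, PySem.List.pyRange_one_cons h]
    simp only [h, dif_pos, List.map_cons]
    rw [← pvScanned, ← ih (i + 1) (by omega)]

-- A's loop as a pure function of the scanned element list
def pvProc : List String → List Int → Option (List Int)
  | [], _ => none
  | c :: rest, mess =>
    if c = "[" then pvProc rest []
    else if c = "]" then (if mess = [] then some [0] else some mess)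
    else
      match PySem.Int.ofStr? c with
      | none => none
      | some v => pvProc rest (mess ++ [v])

-- B's computation as a pure function of the element list it inspects
def pvCore (s : List String) (mess : List Int) : Option (List Int) :=
  match PySem.List.index? s "]" with
  | none => none
  | some j =>
    match PySem.List.index? (s.take j).reverse "[" with
    | none =>
      match pvParseAll (s.take j) with
      | none => none
      | some vs => if mess ++ vs = [] then some [0] else some (mess ++ vs)
    | some k =>
      match pvParseAll ((s.take j).drop ((s.take j).length - k)) with
      | none => none
      | some vs => if vs = [] then some [0] else some vs

lemma pvScan_nil (message : List String) (i : Int) (h : ¬ i < (message.length : Int)) :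
    pvScan message i = [] := by
  rw [pvScan]; simp [h]

lemma pvScan_cons (message : List String) (i : Int) (h : i < (message.length : Int)) :
    pvScan message i = (PySem.List.pyGet? message i).getD "" :: pvScan message (i + 1) := by
  rw [pvScan]; simp [h]

lemma pvALoop_eq_proc (message : List String) (k : Nat) :
    ∀ (i : Int) (mess : List Int), ((message.length : Int) - i).toNat = k →
      (-(message.length : Int) ≤ i ∨ (message.length : Int) ≤ i) →
      pvALoop message k i mess = pvProc (pvScan message i) mess := by
  induction k with
  | zero =>
    intro i mess hk _
    have h : ¬ i < (message.length : Int) := by omega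
    rw [pvALoop, pvScan_nil message i h]
    simp [h, pvProc]
  | succ k ih =>
    intro i mess hk hr
    have h : i < (message.length : Int) := by omega
    have hge : -(message.length : Int) ≤ i := by omega
    have hin : PySem.Raise.InRange message.length i := by
      constructor <;> omega
    obtain ⟨x, hx⟩ : ∃ x, PySem.List.pyGet? message i = some x := by
      rcases hh : PySem.List.pyGet? message i with _ | x
      · exact absurd hin (by simpa using (PySem.List.pyGet?_eq_none_iff message i).mp hh)
      · exact ⟨x, rfl⟩
    have hrec : ∀ m, pvALoop message k (i+1) m = pvProc (pvScan message (i+1)) m := by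
      intro m; exact ih (i+1) m (by omega) (by omega)
    rw [pvALoop, pvScan_cons message i h]
    simp only [h, if_pos, hx, Option.getD_some, pvProc]
    by_cases hb : x = "["
    · simp [hb, hrec]
    · by_cases hc : x = "]"
      · simp [hc]
      · simp only [hb, hc, if_neg, ne_eq, not_false_iff, if_pos]
        rcases hp : PySem.Int.ofStr? x with _ | v
        · simp
        · simp [hrec]

lemma pvProc_eq_core (s : List String) :
    ∀ (mess : List Int),
      (∀ x ∈ s.takeWhile (fun t => t ≠ "]"), x = "[" ∨ (PySem.Int.ofStr? x).isSome) →
      pvProc s mess = pvCore s mess := by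
  induction s with
  | nil => intro mess _; simp [pvProc, pvCore, PySem.List.index?]
  | cons c rest ih =>
    intro mess hp
    by_cases hc : c = "]"
    · subst hc
      simp only [pvCore, PySem.List.index?_cons_self, List.take_zero, List.reverse_nil,
        pvParseAll, pvProc]
      simp
    · have htw : (c :: rest).takeWhile (fun t => decide (t ≠ "]"))
          = c :: rest.takeWhile (fun t => decide (t ≠ "]")) := by
        rw [List.takeWhile_cons, if_pos (by simpa using hc)]
      have hp' : ∀ x ∈ rest.takeWhile (fun t => t ≠ "]"), x = "[" ∨ (PySem.Int.ofStr? x).isSome := by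
        intro x hx
        exact hp x (by rw [htw]; exact List.mem_cons_of_mem _ hx)
      have hchead : c = "[" ∨ (PySem.Int.ofStr? c).isSome := by
        apply hp c
        rw [htw]; exact List.mem_cons_self
      have hidx : PySem.List.index? (c :: rest) "]" = (PySem.List.index? rest "]").map (· + 1) :=
        PySem.List.index?_cons_of_ne rest hc
      have hunfold : pvProc (c :: rest) mess =
          (if c = "[" then pvProc rest []
           else match PySem.Int.ofStr? c with
                | none => none
                | some v => pvProc rest (mess ++ [v])) := by
        rw [pvProc]; simp [hc]
      rcases hj : PySem.List.index? rest "]" with _ | j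
      · -- no ']' anywhere: everything is none
        have hnone : pvCore (c :: rest) mess = none := by
          simp only [pvCore, hidx, hj, Option.map_none]
        have hnone' : ∀ m, pvCore rest m = none := fun m => by
          simp only [pvCore, hj]
        rw [hunfold, hnone]
        by_cases hb : c = "["
        · rw [if_pos hb, ih [] hp', hnone']
        · rcases hchead with h1 | h1
          · exact absurd h1 hb
          obtain ⟨v, hv⟩ := Option.isSome_iff_exists.mp h1
          rw [if_neg hb, hv]
          show pvProc rest (mess ++ [v]) = none
          rw [ih (mess ++ [v]) hp', hnone']
      · -- first ']' of the tail at position j, of the whole list at j + 1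
        have hjlen : j < rest.length := by
          obtain ⟨hk, _, _⟩ := PySem.List.getElem_of_index?_eq_some hj
          exact hk
        have htake : (c :: rest).take (j + 1) = c :: rest.take j := by simp
        have hlen : (rest.take j).length = j := by
          simp [List.length_take]; omega
        have hcore : pvCore (c :: rest) mess =
            match PySem.List.index? ((rest.take j).reverse ++ [c]) "[" with
            | none =>
              match pvParseAll (c :: rest.take j) with
              | none => none
              | some vs => if mess ++ vs = [] then some [0] else some (mess ++ vs)
            | some k =>
              match pvParseAll ((c :: rest.take j).drop ((c :: rest.take j).length - k)) with
              | none => none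
              | some vs => if vs = [] then some [0] else some vs := by
          simp only [pvCore, hidx, hj, Option.map_some, htake, List.reverse_cons]
        -- the shared '[' ∈ rest.take j argument: both sides find the same last '['
        by_cases hmem : ("[" : String) ∈ rest.take j
        · have hmemrev : ("[" : String) ∈ (rest.take j).reverse := by simpa using hmem
          rcases hk : PySem.List.index? (rest.take j).reverse "[" with _ | k
          · exact absurd ((PySem.List.index?_eq_none_iff _ _).mp hk) (by simpa using hmemrev)
          obtain ⟨hklen, _, _⟩ := PySem.List.getElem_of_index?_eq_some hk
          have hklen' : k < j := by simpa [hlen] using hklen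
          have hkidx : PySem.List.index? ((rest.take j).reverse ++ [c]) "[" = some k := by
            rw [PySem.List.index?_append_of_mem _ hmemrev, hk]
          have hdrop : (c :: rest.take j).drop ((c :: rest.take j).length - k)
              = (rest.take j).drop ((rest.take j).length - k) := by
            have h1 : (c :: rest.take j).length - k = ((rest.take j).length - k) + 1 := by
              simp only [List.length_cons, hlen]; omega
            rw [h1, List.drop_succ_cons]
          have hrest : ∀ m, pvCore rest m =
              match pvParseAll ((rest.take j).drop ((rest.take j).length - k)) with
              | none => none
              | some vs => if vs = [] then some [0] else some vs := fun m => by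
            simp only [pvCore, hj, hk]
          rw [hunfold, hcore, hkidx]
          by_cases hb : c = "["
          · rw [if_pos hb, ih [] hp', hrest []]
            simp only [hdrop]
          · rcases hchead with h1 | h1
            · exact absurd h1 hb
            obtain ⟨v, hv⟩ := Option.isSome_iff_exists.mp h1
            rw [if_neg hb, hv]
            show pvProc rest (mess ++ [v]) = _
            rw [ih (mess ++ [v]) hp', hrest (mess ++ [v])]
            simp only [hdrop]
        · have hnotrev : ("[" : String) ∉ (rest.take j).reverse := by simpa using hmem
          have hknone : PySem.List.index? (rest.take j).reverse "[" = none :=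
            (PySem.List.index?_eq_none_iff _ _).mpr hnotrev
          have hrest : ∀ m, pvCore rest m =
              match pvParseAll (rest.take j) with
              | none => none
              | some vs => if m ++ vs = [] then some [0] else some (m ++ vs) := fun m => by
            simp only [pvCore, hj, hknone]
          rw [hunfold, hcore]
          by_cases hb : c = "["
          · -- c is the last '[': the whole accumulated prefix is dropped
            have hkidx : PySem.List.index? ((rest.take j).reverse ++ [c]) "["
                = some (rest.take j).reverse.length := by
              rw [hb]; exact PySem.List.index?_append_singleton_self _ _ hnotrev
            have hdrop : (c :: rest.take j).drop ((c :: rest.take j).length - (rest.take j).reverse.length)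
                = rest.take j := by
              simp
            rw [if_pos hb, ih [] hp', hrest [], hkidx]
            simp only [hdrop]
            simp
          · rcases hchead with h1 | h1
            · exact absurd h1 hb
            obtain ⟨v, hv⟩ := Option.isSome_iff_exists.mp h1
            have hknone' : PySem.List.index? ((rest.take j).reverse ++ [c]) "[" = none := by
              apply (PySem.List.index?_eq_none_iff _ _).mpr
              simp only [List.mem_append, List.mem_singleton]
              rintro (h | h)
              · exact hnotrev h
              · exact hb h.symm
            have hparse : pvParseAll (c :: rest.take j)
                = (pvParseAll (rest.take j)).map (v :: ·) := by
              rw [pvParseAll, hv]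
            rw [if_neg hb, hv]
            show pvProc rest (mess ++ [v]) = _
            rw [ih (mess ++ [v]) hp', hrest (mess ++ [v]), hknone', hparse]
            rcases pvParseAll (rest.take j) with _ | vs
            · rfl
            · simp [List.append_assoc]

lemma pvScan_nonneg (message : List String) (k : Nat) :
    ∀ i : Int, 0 ≤ i → ((message.length : Int) - i).toNat = k →
      pvScan message i = message.drop i.toNat := by
  induction k with
  | zero =>
    intro i h0 hk
    have h : ¬ i < (message.length : Int) := by omega
    rw [pvScan_nil message i h, List.drop_eq_nil_iff.mpr (by omega)]
  | succ k ih =>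
    intro i h0 hk
    have h : i < (message.length : Int) := by omega
    rw [pvScan_cons message i h, ih (i+1) (by omega) (by omega)]
    have hlt : i.toNat < message.length := by omega
    have hget : PySem.List.pyGet? message i = some message[i.toNat] :=
      PySem.List.pyGet?_eq_some_getElem message h0 h
    rw [hget]
    have : (i + 1).toNat = i.toNat + 1 := by omega
    rw [this]
    simp only [Option.getD_some]
    rw [List.drop_eq_getElem_cons hlt]

lemma pvScan_neg (message : List String) (k : Nat) :
    ∀ i : Int, -(message.length : Int) ≤ i → i < 0 → (-i).toNat = k →
      pvScan message i = message.drop ((message.length : Int) + i).toNat ++ message := by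
  induction k with
  | zero => intro i _ hneg hk; omega
  | succ k ih =>
    intro i hge hneg hk
    have hlen0 : 0 < (message.length : Int) := by omega
    have h : i < (message.length : Int) := by omega
    rw [pvScan_cons message i h]
    have hidx : ((message.length : Int) + i).toNat < message.length := by omega
    have hget : PySem.List.pyGet? message i = some message[((message.length : Int) + i).toNat] := by
      have := PySem.List.pyGet?_neg_natCast (xs := message) (k := (-i).toNat)
        (by omega) (by omega)
      have hi : -(((-i).toNat : Nat) : Int) = i := by omega
      rw [hi] at this
      rw [this]
      have hmn : message.length - (-i).toNat = ((message.length : Int) + i).toNat := by omega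
      rw [hmn, List.getElem?_eq_getElem hidx]
    rw [hget]
    rcases eq_or_lt_of_le (show i + 1 ≤ 0 by omega) with heq | hlt
    · have hi0 : i = -1 := by omega
      subst hi0
      have h01 : (-1 : Int) + 1 = 0 := by norm_num
      rw [h01, pvScan_nonneg message ((message.length : Int) - 0).toNat 0 (by omega) rfl]
      simp only [Option.getD_some, Int.toNat_zero, List.drop_zero]
      rw [List.drop_eq_getElem_cons hidx]
      have hnil : message.drop (((message.length : Int) + -1).toNat + 1) = [] :=
        List.drop_eq_nil_iff.mpr (by omega)
      rw [hnil]
      rfl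
    · rw [ih (i+1) (by omega) hlt (by omega)]
      simp only [Option.getD_some]
      have h1 : ((message.length : Int) + (i + 1)).toNat = ((message.length : Int) + i).toNat + 1 := by omega
      rw [h1, List.drop_eq_getElem_cons hidx]
      rfl

-- B's port equals pvCore applied to the tail slice it scans
lemma alt_eq_core (message : List String) (index : Int) :
    listToTest_alt message index
      = pvCore (PySem.List.slice message (some (index + 1)) none) [] := by
  rw [listToTest_alt]
  set s := PySem.List.slice message (some (index + 1)) none with hs
  rcases hj : PySem.List.index? s "]" with _ | j
  · rw [pvCore, hj]
  · rw [pvCore, hj]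
    obtain ⟨hjlen, _, _⟩ := PySem.List.getElem_of_index?_eq_some hj
    have htake : PySem.List.slice s none (some (j : Int)) = s.take j :=
      PySem.List.slice_to_natCast s j
    simp only [htake]
    rcases hk : PySem.List.index? (s.take j).reverse "[" with _ | k
    · rfl
    · obtain ⟨hklen, _, _⟩ := PySem.List.getElem_of_index?_eq_some hk
      have hkle : k ≤ (s.take j).length := by
        simpa using Nat.le_of_lt hklen
      have hslice : PySem.List.slice (s.take j) (some (((s.take j).length : Int) - (k : Int))) none
          = (s.take j).drop ((s.take j).length - k) := by
        rw [PySem.List.slice_from _ (by omega)]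
        congr 1
        omega
      simp only [hslice]

-- the tail slice for a negative in-range start is the matching drop
lemma slice_neg_eq_drop (message : List String) (index : Int)
    (hneg : index + 1 < 0) (hge : -(message.length : Int) ≤ index + 1) :
    PySem.List.slice message (some (index + 1)) none
      = message.drop ((message.length : Int) + (index + 1)).toNat := by
  have hk : 0 < (-(index + 1)).toNat := by omega
  have := PySem.List.slice_from_neg_natCast (xs := message) (k := (-(index + 1)).toNat) hk
  have hi : -(((-(index + 1)).toNat : Nat) : Int) = index + 1 := by omega
  rw [hi] at this
  rw [this]
  congr 1
  omega

-- A's scanned sequence for a negative in-range start: tail slice, then the whole list again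
lemma scan_neg_eq (message : List String) (index : Int)
    (hneg : index + 1 < 0) (hge : -(message.length : Int) ≤ index + 1) :
    pvScan message (index + 1)
      = PySem.List.slice message (some (index + 1)) none ++ message := by
  rw [slice_neg_eq_drop message index hneg hge,
    pvScan_neg message (-(index + 1)).toNat (index + 1) hge hneg rfl]

-- if ']' occurs in s, B's core result ignores anything appended after s
lemma pvCore_append (s t : List String) (m : List Int) (h : ("]" : String) ∈ s) :
    pvCore (s ++ t) m = pvCore s m := by
  rcases hj : PySem.List.index? s "]" with _ | j
  · exact absurd ((PySem.List.index?_eq_none_iff _ _).mp hj) (by simpa using h)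
  · obtain ⟨hjlen, _, _⟩ := PySem.List.getElem_of_index?_eq_some hj
    have hidx : PySem.List.index? (s ++ t) "]" = some j := by
      rw [PySem.List.index?_append_of_mem _ h, hj]
    have htake : (s ++ t).take j = s.take j :=
      List.take_append_of_le_length (Nat.le_of_lt hjlen)
    simp only [pvCore, hidx, hj, htake]

-- A's loop returns a value once ']' is reachable and everything before it parses
lemma pvProc_isSome (s : List String) :
    ∀ (mess : List Int), ("]" : String) ∈ s →
      (∀ x ∈ s.takeWhile (fun t => t ≠ "]"), x = "[" ∨ (PySem.Int.ofStr? x).isSome) →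
      (pvProc s mess).isSome := by
  induction s with
  | nil => intro mess h _; simp at h
  | cons c rest ih =>
    intro mess hmem hp
    by_cases hc : c = "]"
    · subst hc
      rw [pvProc]
      rw [if_neg (show ¬("]" : String) = "[" by decide), if_pos rfl]
      split_ifs <;> simp
    · have htw : (c :: rest).takeWhile (fun t => decide (t ≠ "]"))
          = c :: rest.takeWhile (fun t => decide (t ≠ "]")) := by
        rw [List.takeWhile_cons, if_pos (by simpa using hc)]
      have hp' : ∀ x ∈ rest.takeWhile (fun t => t ≠ "]"), x = "[" ∨ (PySem.Int.ofStr? x).isSome := by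
        intro x hx
        exact hp x (by rw [htw]; exact List.mem_cons_of_mem _ hx)
      have hmem' : ("]" : String) ∈ rest := by
        rcases List.mem_cons.mp hmem with h | h
        · exact absurd h.symm hc
        · exact h
      have hchead : c = "[" ∨ (PySem.Int.ofStr? c).isSome := by
        apply hp c
        rw [htw]; exact List.mem_cons_self
      rw [pvProc]
      by_cases hb : c = "["
      · simpa [hb] using ih [] hmem' hp'
      · rcases hchead with h1 | h1
        · exact absurd h1 hb
        obtain ⟨v, hv⟩ := Option.isSome_iff_exists.mp h1
        simpa [hb, hc, hv] using ih (mess ++ [v]) hmem' hp'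

-- ===== VERDICT (by name: the statements are the Claim_ definitions above) =====
theorem listToTest_spec : Claim_unchanged_listToTest := by
  intro message index _hdom hpre hnd
  obtain ⟨h1, h2⟩ := hpre
  show listToTest message index = listToTest_alt message index
  have hsc : pvScan message (index + 1) = pvScanned message (index + 1) :=
    pvScan_eq_scanned message _ (index + 1) rfl
  have h2' : ∀ s ∈ (pvScan message (index + 1)).takeWhile (fun s => s ≠ "]"),
      s = "[" ∨ (PySem.Int.ofStr? s).isSome := by rw [hsc]; exact h2
  by_cases hneg : index + 1 < 0
  · -- negative start: in range (else Pre_ fails), scan = slice ++ message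
    have hge : -(message.length : Int) ≤ index + 1 := by
      by_cases hl : index + 1 < (message.length : Int)
      · exact h1 hl
      · omega
    have hA : listToTest message index = pvCore (pvScan message (index + 1)) [] := by
      rw [listToTest,
        pvALoop_eq_proc message ((message.length : Int) - (index + 1)).toNat (index + 1) [] rfl
          (Or.inl hge),
        pvProc_eq_core _ [] h2']
    rw [hA, alt_eq_core, scan_neg_eq message index hneg hge]
    unfold D_listToTest at hnd
    by_cases hmem : ("]" : String) ∈ PySem.List.slice message (some (index + 1)) none
    · -- ']' in the slice: the appended rescan is unreachable
      exact pvCore_append _ _ [] hmem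
    · -- ']' nowhere in message (else D_ would hold): both sides are none
      have hnm : ("]" : String) ∉ message := fun hm => hnd ⟨hneg, hge, hmem, hm⟩
      have hns : ("]" : String) ∉ PySem.List.slice message (some (index + 1)) none := hmem
      have hidx1 : PySem.List.index?
          (PySem.List.slice message (some (index + 1)) none ++ message) "]" = none := by
        apply (PySem.List.index?_eq_none_iff _ _).mpr
        simp only [List.mem_append]
        rintro (h | h)
        · exact hns h
        · exact hnm h
      have hidx2 : PySem.List.index?
          (PySem.List.slice message (some (index + 1)) none) "]" = none :=
        (PySem.List.index?_eq_none_iff _ _).mpr hns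
      rw [pvCore, pvCore, hidx1, hidx2]
  · -- nonnegative start: the scanned sequence is exactly the tail slice
    have h0 : 0 ≤ index + 1 := by omega
    have hslice : PySem.List.slice message (some (index + 1)) none
        = pvScan message (index + 1) := by
      rw [PySem.List.slice_from message h0,
        pvScan_nonneg message ((message.length : Int) - (index + 1)).toNat (index + 1) h0 rfl]
    rw [listToTest,
      pvALoop_eq_proc message ((message.length : Int) - (index + 1)).toNat (index + 1) [] rfl
        (by omega),
      pvProc_eq_core _ [] h2', alt_eq_core, hslice]

theorem listToTest_changed : Claim_changed_listToTest := by
  unfold Claim_changed_listToTest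
  refine ⟨by decide, by decide, by decide, ?_, by decide, by decide⟩
  show listToTest ["]", "1"] (-2) = some [1]
  rw [listToTest]
  rw [show ((((["]", "1"] : List String).length : Int) - (-2 + 1)).toNat) = 3 by decide]
  rw [pvALoop_eq_proc ["]", "1"] 3 (-2 + 1) [] (by decide) (by norm_num),
    pvScan_eq_scanned ["]", "1"] 3 (-2 + 1) (by decide)]
  decide

theorem listToTest_tight : Claim_exact_listToTest := by
  intro message index _hdom hpre hd
  obtain ⟨h1, h2⟩ := hpre
  obtain ⟨hneg, hge, hns, hnm⟩ := hd
  have hsc : pvScan message (index + 1) = pvScanned message (index + 1) :=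
    pvScan_eq_scanned message _ (index + 1) rfl
  have h2' : ∀ s ∈ (pvScan message (index + 1)).takeWhile (fun s => s ≠ "]"),
      s = "[" ∨ (PySem.Int.ofStr? s).isSome := by rw [hsc]; exact h2
  have hA : listToTest message index = pvProc (pvScan message (index + 1)) [] := by
    rw [listToTest,
      pvALoop_eq_proc message ((message.length : Int) - (index + 1)).toNat (index + 1) [] rfl
        (Or.inl hge)]
  have hmem : ("]" : String) ∈ pvScan message (index + 1) := by
    rw [scan_neg_eq message index hneg hge]
    exact List.mem_append.mpr (Or.inr hnm)
  have hsome : (listToTest message index).isSome := by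
    rw [hA]; exact pvProc_isSome _ [] hmem h2'
  have hBnone : listToTest_alt message index = none := by
    rw [alt_eq_core]
    have hidx : PySem.List.index?
        (PySem.List.slice message (some (index + 1)) none) "]" = none :=
      (PySem.List.index?_eq_none_iff _ _).mpr hns
    rw [pvCore, hidx]
  intro hEq
  rw [hEq, hBnone] at hsome
  simp at hsome
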